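-- pv_equiv track=rewrite | github.com/rbsteinm/Robust-Route-Planner | helpers.py | reduce_path
-- ===== SOURCE A (Python) =====
-- def reduce_path(path):
--     all_rides = []
--     current_ride = []
--     i = 0
--     prev_line = None
--     while(i < len(path)):
--         current_line = path[i][5]
--         if current_line != prev_line:
--             all_rides.append(current_ride)
--             current_ride = [path[i]]
--         else:
--             current_ride.append(path[i])
--         prev_line = current_line
--         i += 1
--     # append last ride
--     all_rides.append(current_ride)
--     return [(ride[0][0],ride[-1][1], ride[0][2], ride[-1][3], ride[0][5], len(ride)) for ride in all_rides if len(ride) > 0]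
-- ===== SOURCE B (Python) =====
-- def reduce_path(path):
--     # span-based grouping: for each run of equal line ids, emit its summary directly
--     rides = []
--     i = 0
--     n = len(path)
--     while i < n:
--         line = path[i][5]
--         j = i
--         while j < n and path[j][5] == line:
--             j += 1
--         first, last = path[i], path[j - 1]
--         rides.append((first[0], last[1], first[2], last[3], line, j - i))
--         i = j
--     return rides
-- ===== Notes on version B (the rewrite author's own statement) =====
-- stated objective: simpler
-- what changed: Replaced the prev_line state machine that builds a list of ride lists (including a dummy empty leading ride filtered out later) with a two-index span scan that finds each maximal run of equal line ids and emits its summary tuple directly.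
import Mathlib
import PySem

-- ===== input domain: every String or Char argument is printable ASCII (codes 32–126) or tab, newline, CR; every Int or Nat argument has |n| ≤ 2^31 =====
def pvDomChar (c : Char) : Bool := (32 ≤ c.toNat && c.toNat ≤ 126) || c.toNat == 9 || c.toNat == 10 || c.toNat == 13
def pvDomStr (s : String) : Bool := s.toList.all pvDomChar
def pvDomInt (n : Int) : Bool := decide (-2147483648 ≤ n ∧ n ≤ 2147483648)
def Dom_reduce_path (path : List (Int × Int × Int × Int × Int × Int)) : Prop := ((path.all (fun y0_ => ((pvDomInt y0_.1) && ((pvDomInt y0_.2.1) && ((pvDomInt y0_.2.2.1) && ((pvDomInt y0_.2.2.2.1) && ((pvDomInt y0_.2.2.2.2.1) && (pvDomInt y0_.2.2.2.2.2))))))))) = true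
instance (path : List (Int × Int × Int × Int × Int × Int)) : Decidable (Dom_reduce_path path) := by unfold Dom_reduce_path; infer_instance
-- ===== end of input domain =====

-- B replaces A's prev_line state machine (list-of-ride-lists + filter) by a direct span scan
-- over maximal runs of equal line ids (objective: simpler); return values proved equal. A does not mutate its argument.

-- ===== PORT A =====
def pvKey (s : Int × Int × Int × Int × Int × Int) : Int := s.2.2.2.2.2

-- A's while loop over index i, with state (prev_line, current_ride, all_rides)
def pvLoopA (prev : Option Int) (cur : List (Int × Int × Int × Int × Int × Int))
    (acc : List (List (Int × Int × Int × Int × Int × Int))) :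
    List (Int × Int × Int × Int × Int × Int) → List (List (Int × Int × Int × Int × Int × Int))
  | [] => acc ++ [cur]
  | x :: xs =>
    if some (pvKey x) ≠ prev then pvLoopA (some (pvKey x)) [x] (acc ++ [cur]) xs
    else pvLoopA (some (pvKey x)) (cur ++ [x]) acc xs

-- the final comprehension: ride[0], ride[-1], keep only non-empty rides
def pvSummA : List (Int × Int × Int × Int × Int × Int) → Option (Int × Int × Int × Int × Int × Int)
  | [] => none
  | f :: t => some (f.1, (t.getLastD f).2.1, f.2.2.1, (t.getLastD f).2.2.2.1, f.2.2.2.2.2, ((f :: t).length : Int))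

def reduce_path (path : List (Int × Int × Int × Int × Int × Int)) : List (Int × Int × Int × Int × Int × Int) :=
  (pvLoopA none [] [] path).filterMap pvSummA

-- ===== PORT B =====
-- outer while: each iteration consumes one maximal run (the inner while = takeWhile/dropWhile split)
def reduce_path_alt (path : List (Int × Int × Int × Int × Int × Int)) : List (Int × Int × Int × Int × Int × Int) :=
  match path with
  | [] => []
  | x :: xs =>
    let grp := xs.takeWhile (fun y => pvKey y == pvKey x)
    let last := grp.getLastD x
    (x.1, last.2.1, x.2.2.1, last.2.2.2.1, pvKey x, ((grp.length : Int) + 1)) ::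
      reduce_path_alt (xs.dropWhile (fun y => pvKey y == pvKey x))
termination_by path.length
decreasing_by
  simp only [List.length_cons]
  exact Nat.lt_succ_of_le (List.length_dropWhile_le _ _)

-- ===== PRECONDITION & SPEC =====
def Spec_reduce_path (path : List (Int × Int × Int × Int × Int × Int)) (out : List (Int × Int × Int × Int × Int × Int)) : Prop := out = reduce_path_alt path
instance (path : List (Int × Int × Int × Int × Int × Int)) (out : List (Int × Int × Int × Int × Int × Int)) : Decidable (Spec_reduce_path path out) := by unfold Spec_reduce_path; infer_instance

-- ===== CLAIM (what is proved, stated in full; the proofs are below) =====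
def Claim_equal_reduce_path : Prop := ∀ (path : List (Int × Int × Int × Int × Int × Int)), Dom_reduce_path path → Spec_reduce_path path (reduce_path path)

-- ===== LEMMAS AND PROOFS =====

-- the list of maximal runs, as plain lists of segments
def pvGroups : List (Int × Int × Int × Int × Int × Int) → List (List (Int × Int × Int × Int × Int × Int))
  | [] => []
  | x :: xs =>
    (x :: xs.takeWhile (fun y => pvKey y == pvKey x)) ::
      pvGroups (xs.dropWhile (fun y => pvKey y == pvKey x))
termination_by l => l.length
decreasing_by
  simp only [List.length_cons]
  exact Nat.lt_succ_of_le (List.length_dropWhile_le _ _)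

lemma pvLoopA_eq (xs : List (Int × Int × Int × Int × Int × Int)) :
    ∀ (k : Int) (cur : List (Int × Int × Int × Int × Int × Int))
      (acc : List (List (Int × Int × Int × Int × Int × Int))),
      pvLoopA (some k) cur acc xs =
        acc ++ (cur ++ xs.takeWhile (fun y => pvKey y == k)) ::
          pvGroups (xs.dropWhile (fun y => pvKey y == k)) := by
  induction xs with
  | nil => intro k cur acc; simp [pvLoopA, pvGroups]
  | cons x xs ih =>
    intro k cur acc
    by_cases h : pvKey x = k
    · subst h
      rw [show pvLoopA (some (pvKey x)) cur acc (x :: xs)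
            = pvLoopA (some (pvKey x)) (cur ++ [x]) acc xs from by simp [pvLoopA]]
      rw [ih]
      rw [List.takeWhile_cons_of_pos (by simp), List.dropWhile_cons_of_pos (by simp)]
      simp
    · rw [show pvLoopA (some k) cur acc (x :: xs)
            = pvLoopA (some (pvKey x)) [x] (acc ++ [cur]) xs from by simp [pvLoopA, h]]
      rw [ih]
      rw [List.takeWhile_cons_of_neg (by simp [h]), List.dropWhile_cons_of_neg (by simp [h])]
      rw [pvGroups]
      simp

lemma pvSummA_cons (f : Int × Int × Int × Int × Int × Int)
    (t : List (Int × Int × Int × Int × Int × Int)) :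
    pvSummA (f :: t) =
      some (f.1, (t.getLastD f).2.1, f.2.2.1, (t.getLastD f).2.2.2.1, pvKey f,
        ((t.length : Int) + 1)) := by
  simp [pvSummA, pvKey]

lemma pvFilterMap_groups (l : List (Int × Int × Int × Int × Int × Int)) :
    (pvGroups l).filterMap pvSummA = reduce_path_alt l := by
  induction l using pvGroups.induct with
  | case1 => simp [pvGroups, reduce_path_alt]
  | case2 x xs ih =>
    rw [pvGroups, List.filterMap_cons, pvSummA_cons, reduce_path_alt, ih]

-- ===== VERDICT (by name: the statement is the Claim_ definition above) =====
theorem reduce_path_spec : Claim_equal_reduce_path := by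
  intro path _
  unfold Spec_reduce_path reduce_path
  cases path with
  | nil => simp [pvLoopA, pvSummA, reduce_path_alt]
  | cons x xs =>
    rw [show pvLoopA none [] [] (x :: xs)
          = pvLoopA (some (pvKey x)) [x] [[]] xs from by simp [pvLoopA]]
    rw [pvLoopA_eq]
    rw [show ([[]] : List (List (Int × Int × Int × Int × Int × Int)))
          ++ ([x] ++ xs.takeWhile (fun y => pvKey y == pvKey x)) ::
             pvGroups (xs.dropWhile (fun y => pvKey y == pvKey x))
          = [] :: (x :: xs.takeWhile (fun y => pvKey y == pvKey x)) ::
             pvGroups (xs.dropWhile (fun y => pvKey y == pvKey x)) from by simp]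
    rw [List.filterMap_cons]
    rw [show pvSummA [] = none from rfl]
    rw [← pvGroups, pvFilterMap_groups]
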